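-- pv_equiv track=rewrite | github.com/johnlinp/misc-tool | budget-tracking/combine.py | _combine_budget_tracking_spreadsheets
-- ===== SOURCE A (Python) =====
-- def _combine_budget_tracking_spreadsheets(budget_tracking_spreadsheets):
--     combined_budget_tracking_spreadsheet = {}
--     for budget_tracking_spreadsheet in budget_tracking_spreadsheets:
--         for date in budget_tracking_spreadsheet:
--             if date not in combined_budget_tracking_spreadsheet:
--                 combined_budget_tracking_spreadsheet[date] = []
--             combined_budget_tracking_spreadsheet[date].extend(budget_tracking_spreadsheet[date])
--     return combined_budget_tracking_spreadsheet
-- ===== SOURCE B (Python) =====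
-- def _combine_budget_tracking_spreadsheets(budget_tracking_spreadsheets):
--     dates = dict.fromkeys(
--         date
--         for spreadsheet in budget_tracking_spreadsheets
--         for date in spreadsheet
--     )
--     return {
--         date: [
--             entry
--             for spreadsheet in budget_tracking_spreadsheets
--             if date in spreadsheet
--             for entry in spreadsheet[date]
--         ]
--         for date in dates
--     }
-- ===== Notes on version B (the rewrite author's own statement) =====
-- stated objective: alternative
-- what changed: B inverts the loop nesting into two passes: it first builds the order-preserving union of all date keys (dict.fromkeys), then constructs the result with one entry per date whose value concatenates that date's lists across all spreadsheets in input order, instead of A's incremental grow-a-dict-as-you-go loop.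
import Mathlib
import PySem

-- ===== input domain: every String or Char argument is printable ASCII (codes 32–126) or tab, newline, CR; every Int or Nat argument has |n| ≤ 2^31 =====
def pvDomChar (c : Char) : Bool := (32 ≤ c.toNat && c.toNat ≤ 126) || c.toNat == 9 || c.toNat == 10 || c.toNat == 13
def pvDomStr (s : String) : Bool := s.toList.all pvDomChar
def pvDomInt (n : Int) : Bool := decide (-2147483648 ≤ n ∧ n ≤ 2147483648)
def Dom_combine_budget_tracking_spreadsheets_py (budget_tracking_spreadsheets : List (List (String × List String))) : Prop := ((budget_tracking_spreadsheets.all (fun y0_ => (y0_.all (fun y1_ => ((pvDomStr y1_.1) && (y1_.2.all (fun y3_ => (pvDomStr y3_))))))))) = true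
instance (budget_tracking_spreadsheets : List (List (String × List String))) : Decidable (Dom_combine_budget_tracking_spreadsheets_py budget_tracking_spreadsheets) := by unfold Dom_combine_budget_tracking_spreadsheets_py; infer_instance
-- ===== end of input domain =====

-- B inverts A's loop nest: first an order-preserving union of all date keys, then one
-- result entry per date concatenating that date's lists across spreadsheets (alternative
-- decomposition, same cost class).


-- ===== PORT A =====
-- Each inner list is a Python dict (association list, unique keys); 'for date in spreadsheet'
-- walks its keys in order, so we walk the pairs and take each pair's key; 'spreadsheet[date]'
-- is the dict lookup (first match; the key is present, so '.getD []' is exact).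
def combine_budget_tracking_spreadsheets_py (budget_tracking_spreadsheets : List (List (String × List String))) : List (String × List String) :=
  (budget_tracking_spreadsheets.foldl
    (fun combined spreadsheet =>
      spreadsheet.foldl
        (fun combined p =>
          let combined :=
            if combined.contains p.1 then combined
            else combined.insert p.1 ([] : List String)
          combined.modify p.1 [] (· ++ ((PySem.Dict.mk spreadsheet).get? p.1).getD []))
        combined)
    (PySem.Dict.empty : PySem.Dict String (List String))).items

-- ===== PORT B =====
-- 'if date in spreadsheet … spreadsheet[date]' contributes the looked-up list when the key
-- is present and nothing otherwise: '((Dict.mk spreadsheet).get? date).getD []'.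
def combine_budget_tracking_spreadsheets_py_alt (budget_tracking_spreadsheets : List (List (String × List String))) : List (String × List String) :=
  let dates := PySem.List.dedup
    (budget_tracking_spreadsheets.flatMap (fun spreadsheet => spreadsheet.map Prod.fst))
  dates.map (fun date =>
    (date, budget_tracking_spreadsheets.flatMap
      (fun spreadsheet => ((PySem.Dict.mk spreadsheet).get? date).getD [])))

-- ===== PRECONDITION & SPEC =====
-- Pre_ excludes association lists carrying duplicate date keys inside one spreadsheet:
-- a Python dict cannot have duplicate keys, so such Lean values correspond to no Python input.
def Pre_combine_budget_tracking_spreadsheets_py (budget_tracking_spreadsheets : List (List (String × List String))) : Prop :=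
  ∀ spreadsheet ∈ budget_tracking_spreadsheets, (spreadsheet.map Prod.fst).Nodup
instance (budget_tracking_spreadsheets : List (List (String × List String))) : Decidable (Pre_combine_budget_tracking_spreadsheets_py budget_tracking_spreadsheets) := by unfold Pre_combine_budget_tracking_spreadsheets_py; infer_instance

def pvWitness_combine_budget_tracking_spreadsheets_py : (List (List (String × List String))) :=
  [[("2024-01-01", ["lunch 10"])], [("2024-01-01", ["rent 500"]), ("2024-01-02", ["bus 2"])]]

def Spec_combine_budget_tracking_spreadsheets_py (budget_tracking_spreadsheets : List (List (String × List String))) (out : List (String × List String)) : Prop := out = combine_budget_tracking_spreadsheets_py_alt budget_tracking_spreadsheets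
instance (budget_tracking_spreadsheets : List (List (String × List String))) (out : List (String × List String)) : Decidable (Spec_combine_budget_tracking_spreadsheets_py budget_tracking_spreadsheets out) := by unfold Spec_combine_budget_tracking_spreadsheets_py; infer_instance

-- ===== CLAIM (what is proved, stated in full; the proofs are below) =====
def Claim_equal_combine_budget_tracking_spreadsheets_py : Prop := ∀ (budget_tracking_spreadsheets : List (List (String × List String))), Dom_combine_budget_tracking_spreadsheets_py budget_tracking_spreadsheets → Pre_combine_budget_tracking_spreadsheets_py budget_tracking_spreadsheets → Spec_combine_budget_tracking_spreadsheets_py budget_tracking_spreadsheets (combine_budget_tracking_spreadsheets_py budget_tracking_spreadsheets)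

-- ===== LEMMAS AND PROOFS =====

-- A's per-pair step (setdefault-to-[] then extend) is one 'modify'.
theorem step_eq_modify (acc : PySem.Dict String (List String)) (k : String) (vs : List String) :
    (if acc.contains k then acc else acc.insert k ([] : List String)).modify k [] (· ++ vs)
      = acc.modify k [] (· ++ vs) := by
  by_cases h : acc.contains k = true
  · simp [h]
  · simp only [h, Bool.false_eq_true, if_false]
    simp [PySem.Dict.modify, PySem.Dict.getD_insert_self, PySem.Dict.insert_insert_self,
      PySem.Dict.getD_of_not_contains acc ([] : List String) (by simpa using h)]

-- the value an extend-loop leaves at key c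
theorem getD_foldl_modify_extend (l : List (String × List String))
    (d : PySem.Dict String (List String)) (c : String) :
    (l.foldl (fun d p => d.modify p.1 [] (· ++ p.2)) d).getD c []
      = d.getD c [] ++ (l.filter (fun p => p.1 == c)).flatMap Prod.snd := by
  induction l generalizing d with
  | nil => simp
  | cons p l ih =>
    simp only [List.foldl_cons, ih, List.filter_cons]
    rw [PySem.Dict.getD_modify]
    by_cases h : c = p.1
    · simp [h, List.append_assoc]
    · have h2 : (p.1 == c) = false := beq_eq_false_iff_ne.mpr (Ne.symm h)
      simp [h, h2]

-- looking a present key up in a duplicate-free spreadsheet returns that pair's list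
theorem firstGet_eq_filter (s : List (String × List String))
    (hnd : (s.map Prod.fst).Nodup) (k : String) :
    ((PySem.Dict.mk s).get? k).getD []
      = (s.filter (fun p => p.1 == k)).flatMap Prod.snd := by
  induction s with
  | nil => simp [PySem.Dict.get?]
  | cons q s ih =>
    simp only [List.map_cons, List.nodup_cons] at hnd
    rw [PySem.Dict.get?_mk_cons, List.filter_cons]
    by_cases h : q.1 = k
    · have : (s.filter (fun p => p.1 == k)).flatMap Prod.snd = [] := by
        rw [List.filter_eq_nil_iff.mpr, List.flatMap_nil]
        intro p hp
        simp only [beq_iff_eq]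
        intro hpk
        have : q.1 ∈ s.map Prod.fst := by
          rw [h, ← hpk]; exact List.mem_map_of_mem hp
        exact hnd.1 this
      simp [h, this]
    · have h2 : (q.1 == k) = false := beq_eq_false_iff_ne.mpr h
      simp [h2, ih hnd.2]

theorem combine_budget_tracking_spreadsheets_py_spec : Claim_equal_combine_budget_tracking_spreadsheets_py := by
  intro ss _hdom hpre
  unfold Spec_combine_budget_tracking_spreadsheets_py
  unfold combine_budget_tracking_spreadsheets_py combine_budget_tracking_spreadsheets_py_alt
  -- 1. collapse A's per-pair step to a plain modify-by-own-value loop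
  rw [PySem.List.foldl_congr_mem _ _
        (fun acc s => s.foldl (fun d (p : String × List String) => d.modify p.1 [] (· ++ p.2)) acc) _
        (by
          intro acc s hs
          exact PySem.List.foldl_congr_mem _ _ _ _ (by
            intro a p hp
            rw [step_eq_modify]
            have : (PySem.Dict.mk s).get? p.1 = some p.2 :=
              PySem.Dict.get?_of_mem_items (PySem.Dict.mk s)
                (by simpa using hp) (by simpa using hpre s hs)
            rw [this]
            rfl))]
  -- 2. flatten the nested fold
  rw [← List.foldl_flatten]
  -- 3. read the final dict off: keys and values
  have hkeys : (ss.flatten.foldl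
      (fun d (p : String × List String) => d.modify p.1 [] (· ++ p.2))
      (PySem.Dict.empty : PySem.Dict String (List String))).keys
      = PySem.Set.ofList (ss.flatten.map Prod.fst) := by
    rw [PySem.Dict.keys_foldl_modify_key ss.flatten Prod.fst [] (fun _ p => (· ++ p.2)),
      PySem.Dict.keys_empty]
    exact PySem.Set.update_empty _
  have hnodup : (ss.flatten.foldl
      (fun d (p : String × List String) => d.modify p.1 [] (· ++ p.2))
      (PySem.Dict.empty : PySem.Dict String (List String))).keys.Nodup := by
    exact PySem.Dict.nodup_keys_foldl_modify_key ss.flatten Prod.fst [] (fun _ p => (· ++ p.2)) _ (by simp)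
  rw [PySem.Dict.items_eq_map_keys _ hnodup ([] : List String), hkeys]
  -- 4. both sides are maps over the same deduplicated key list
  rw [PySem.List.dedup_eq_ofList]
  have hdates : ss.flatMap (fun s => s.map Prod.fst) = ss.flatten.map Prod.fst := by
    simp [List.map_flatten, List.flatMap_def]
  rw [hdates]
  refine List.map_congr_left ?_
  intro k hk
  rw [getD_foldl_modify_extend]
  have hvals : ss.flatMap (fun s => ((PySem.Dict.mk s).get? k).getD [])
      = (ss.flatten.filter (fun p => p.1 == k)).flatMap Prod.snd := by
    calc ss.flatMap (fun s => ((PySem.Dict.mk s).get? k).getD [])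
        = ss.flatMap (fun s => (s.filter (fun p => p.1 == k)).flatMap Prod.snd) := by
          refine List.flatMap_congr ?_
          intro s hs
          exact firstGet_eq_filter s (hpre s hs) k
      _ = (ss.flatMap (fun s => s.filter (fun p => p.1 == k))).flatMap Prod.snd := by
          rw [List.flatMap_assoc]
      _ = (ss.flatten.filter (fun p => p.1 == k)).flatMap Prod.snd := by
          simp [List.filter_flatten, List.flatMap_def]
  rw [hvals]
  simp
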